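-- pv_equiv track=rewrite | github.com/varungupta132/T32_Autonomous-AI-Blog-to-Podcast-and-Video-Agent-Using-Virtual-3D-Avatars | utils.py | normalize_speaker_labels
-- ===== SOURCE A (Python) =====
-- def normalize_speaker_labels(script: str) -> str:
--     """
--     Standardize speaker labels in script
--
--     Args:
--         script: Script text with inconsistent labels
--
--     Returns:
--         Script with normalized labels
--     """
--     replacements = {
--         'Host 1:': 'Alex:',
--         'Host 2:': 'Sam:',
--         'Host1:': 'Alex:',
--         'Host2:': 'Sam:',
--         'Host 1 :': 'Alex:',
--         'Host 2 :': 'Sam:',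
--     }
--
--     for old, new in replacements.items():
--         script = script.replace(old, new)
--
--     return script
-- ===== SOURCE B (Python) =====
-- import re
--
-- _MAPPING = {
--     'Host 1:': 'Alex:',
--     'Host 2:': 'Sam:',
--     'Host1:': 'Alex:',
--     'Host2:': 'Sam:',
--     'Host 1 :': 'Alex:',
--     'Host 2 :': 'Sam:',
-- }
-- _PATTERN = re.compile('|'.join(re.escape(k) for k in _MAPPING))
--
-- def normalize_speaker_labels(script: str) -> str:
--     """Standardize speaker labels in one left-to-right pass."""
--     return _PATTERN.sub(lambda m: _MAPPING[m.group(0)], script)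
-- ===== Notes on version B (the rewrite author's own statement) =====
-- stated objective: idiomatic
-- what changed: Replaces the six sequential full-string .replace() passes by one compiled regex alternation over the escaped keys with a single re.sub pass routing each match through the mapping; equivalent because the keys are pairwise prefix-incomparable and the replacement values contain no key material.
import Mathlib
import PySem

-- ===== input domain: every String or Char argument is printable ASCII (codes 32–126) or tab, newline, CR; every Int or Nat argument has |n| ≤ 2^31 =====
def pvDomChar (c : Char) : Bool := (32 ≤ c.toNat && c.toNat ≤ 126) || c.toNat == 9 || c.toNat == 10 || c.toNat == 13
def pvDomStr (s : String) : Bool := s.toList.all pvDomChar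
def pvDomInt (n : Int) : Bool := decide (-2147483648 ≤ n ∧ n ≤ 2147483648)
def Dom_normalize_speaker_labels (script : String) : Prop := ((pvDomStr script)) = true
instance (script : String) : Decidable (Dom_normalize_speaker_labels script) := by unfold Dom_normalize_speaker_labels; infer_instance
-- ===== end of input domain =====

-- B replaces A's six sequential full-string .replace() passes by one compiled regex
-- alternation over the (escaped) keys, applied in a single left-to-right re.sub pass
-- that routes each match through the mapping (objective: idiomatic single pass).

-- ===== PORT A =====
-- A iterates over the dict's items in insertion order, chaining str.replace.
def normalize_speaker_labels (script : String) : String :=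
  let script := PySem.Str.replace script "Host 1:" "Alex:"
  let script := PySem.Str.replace script "Host 2:" "Sam:"
  let script := PySem.Str.replace script "Host1:" "Alex:"
  let script := PySem.Str.replace script "Host2:" "Sam:"
  let script := PySem.Str.replace script "Host 1 :" "Alex:"
  let script := PySem.Str.replace script "Host 2 :" "Sam:"
  script

-- ===== PORT B =====
-- The mapping, in the dict's insertion order (= the regex alternation order).
def pvMapping : List (List Char × List Char) :=
  [("Host 1:".toList, "Alex:".toList),
   ("Host 2:".toList, "Sam:".toList),
   ("Host1:".toList, "Alex:".toList),
   ("Host2:".toList, "Sam:".toList),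
   ("Host 1 :".toList, "Alex:".toList),
   ("Host 2 :".toList, "Sam:".toList)]

-- First alternative of the alternation matching at this position (the regex engine
-- tries the branches left to right); exact for an alternation of escaped literal keys.
def pvFirstMatch (ps : List (List Char × List Char)) (s : List Char) : Option (List Char × List Char) :=
  match ps with
  | [] => none
  | (k, v) :: rest => if k.isPrefixOf s then some (k, v) else pvFirstMatch rest s

-- re.sub for an alternation of literal keys: one left-to-right scan; on a match the
-- callback's value (mapping[key]) is emitted and the scan resumes after the match.
-- Exact port of re.sub here: all keys are nonempty literals, so on a match at c :: cs
-- the scan resumes at cs.drop (k.length - 1) = (c :: cs).drop k.length.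
def pvSub (ps : List (List Char × List Char)) : List Char → List Char
  | [] => []
  | c :: cs =>
    match pvFirstMatch ps (c :: cs) with
    | some (k, v) => v ++ pvSub ps (cs.drop (k.length - 1))
    | none => c :: pvSub ps cs
termination_by s => s.length
decreasing_by
  · simp [List.length_drop]
  · simp

def normalize_speaker_labels_alt (script : String) : String :=
  String.ofList (pvSub pvMapping script.toList)

-- ===== PRECONDITION & SPEC =====
def Spec_normalize_speaker_labels (script : String) (out : String) : Prop := out = normalize_speaker_labels_alt script
instance (script : String) (out : String) : Decidable (Spec_normalize_speaker_labels script out) := by unfold Spec_normalize_speaker_labels; infer_instance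

-- ===== CLAIM (what is proved, stated in full; the proofs are below) =====
def Claim_equal_normalize_speaker_labels : Prop := ∀ (script : String), Dom_normalize_speaker_labels script → Spec_normalize_speaker_labels script (normalize_speaker_labels script)

-- ===== LEMMAS AND PROOFS =====

-- A fuel-free scan equivalent to PySem.Chars.replace for nonempty `old`.
def pvRep (old new : List Char) : List Char → List Char
  | [] => []
  | c :: cs =>
    if old.isPrefixOf (c :: cs) then new ++ pvRep old new (cs.drop (old.length - 1))
    else c :: pvRep old new cs
termination_by s => s.length
decreasing_by
  · simp [List.length_drop]
  · simp

theorem pvRep_go (old new : List Char) (hold : old ≠ []) :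
    ∀ (fuel : Nat) (l acc : List Char), l.length ≤ fuel →
      PySem.Chars.replace.go old new fuel l acc = acc.reverse ++ pvRep old new l := by
  intro fuel
  induction fuel with
  | zero =>
    intro l acc hl
    have : l = [] := List.length_eq_zero_iff.mp (Nat.le_zero.mp hl)
    subst this
    simp [PySem.Chars.replace.go, pvRep]
  | succ n ih =>
    intro l acc hl
    match l with
    | [] => simp [PySem.Chars.replace.go, pvRep]
    | c :: cs =>
      rw [PySem.Chars.replace.go]
      by_cases hp : old.isPrefixOf (c :: cs)
      · rw [if_pos hp, pvRep, if_pos hp]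
        have hdrop : List.drop old.length (c :: cs) = cs.drop (old.length - 1) := by
          cases old with
          | nil => exact absurd rfl hold
          | cons a t => simp
        rw [hdrop]
        rw [ih (cs.drop (old.length - 1)) (new.reverse ++ acc)
            (by
              have h1 : (cs.drop (old.length - 1)).length ≤ cs.length := by
                simp [List.length_drop]
              have h2 : cs.length ≤ n := by simpa using Nat.succ_le_succ_iff.mp hl
              omega)]
        simp
      · rw [if_neg hp, pvRep, if_neg hp]
        rw [ih cs (c :: acc) (by simpa using Nat.succ_le_succ_iff.mp hl)]
        simp

theorem pvReplace_eq_pvRep (old new s : List Char) (hold : old ≠ []) :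
    PySem.Chars.replace s old new = pvRep old new s := by
  rw [PySem.Chars.replace]
  rw [if_neg (by simpa using hold)]
  simpa using pvRep_go old new hold s.length s [] le_rfl

-- `pvFirstMatch ps s = none` iff no key in ps is a prefix of s.
theorem pvFirstMatch_eq_none_iff (ps : List (List Char × List Char)) (s : List Char) :
    pvFirstMatch ps s = none ↔ ∀ p ∈ ps, p.1.isPrefixOf s = false := by
  induction ps with
  | nil => simp [pvFirstMatch]
  | cons p rest ih =>
    obtain ⟨k, v⟩ := p
    by_cases h : k.isPrefixOf s
    · simp [pvFirstMatch, h]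
    · have hb : k.isPrefixOf s = false := Bool.eq_false_iff.mpr h
      simp only [pvFirstMatch, hb, Bool.false_eq_true, if_false, ih, List.mem_cons]
      constructor
      · intro hall p hp
        rcases hp with rfl | hp
        · exact hb
        · exact hall p hp
      · intro hall p hp
        exact hall p (Or.inr hp)

theorem pvFirstMatch_some (ps : List (List Char × List Char)) (s : List Char)
    (p : List Char × List Char) (h : pvFirstMatch ps s = some p) :
    p ∈ ps ∧ p.1.isPrefixOf s = true := by
  induction ps with
  | nil => simp [pvFirstMatch] at h
  | cons q rest ih =>
    obtain ⟨k, v⟩ := q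
    by_cases hk : k.isPrefixOf s
    · simp [pvFirstMatch, hk] at h
      subst h
      exact ⟨by simp, hk⟩
    · simp [pvFirstMatch, hk] at h
      obtain ⟨hmem, hpre⟩ := ih h
      exact ⟨by simp [hmem], hpre⟩

theorem pvFirstMatch_append_some (ps qs : List (List Char × List Char)) (s : List Char)
    (p : List Char × List Char) (h : pvFirstMatch ps s = some p) :
    pvFirstMatch (ps ++ qs) s = some p := by
  induction ps with
  | nil => simp [pvFirstMatch] at h
  | cons q rest ih =>
    obtain ⟨k, v⟩ := q
    by_cases hk : k.isPrefixOf s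
    · simpa [pvFirstMatch, hk] using h
    · simp [pvFirstMatch, hk] at h ⊢
      exact ih h

theorem pvFirstMatch_append_none (ps qs : List (List Char × List Char)) (s : List Char)
    (h : pvFirstMatch ps s = none) :
    pvFirstMatch (ps ++ qs) s = pvFirstMatch qs s := by
  induction ps with
  | nil => simp
  | cons q rest ih =>
    obtain ⟨k, v⟩ := q
    by_cases hk : k.isPrefixOf s
    · simp [pvFirstMatch, hk] at h
    · simp [pvFirstMatch, hk] at h ⊢
      exact ih h

-- A well-formed pair: key headed by 'H' with an 'H'/'A'/'S'-free tail; value headed by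
-- 'A' or 'S' and free of 'H'.
def pvGood (p : List Char × List Char) : Prop :=
  (p.1.head? == some 'H' && p.1.tail.all (fun a => a != 'H' && a != 'A' && a != 'S') &&
   (p.2.head? == some 'A' || p.2.head? == some 'S') && p.2.all (fun a => a != 'H')) = true

theorem pvGood_key (p : List Char × List Char) (h : pvGood p) :
    ∃ t, p.1 = 'H' :: t ∧ ∀ a ∈ t, a ≠ 'H' ∧ a ≠ 'A' ∧ a ≠ 'S' := by
  unfold pvGood at h
  simp only [Bool.and_eq_true, beq_iff_eq, List.all_eq_true] at h
  obtain ⟨⟨⟨h1, h2⟩, -⟩, -⟩ := h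
  match hp : p.1 with
  | [] => rw [hp] at h1; simp at h1
  | c :: t =>
    rw [hp] at h1 h2
    simp at h1
    subst h1
    refine ⟨t, rfl, fun a ha => ?_⟩
    have := h2 a (by simpa using ha)
    simp at this
    exact ⟨this.1.1, this.1.2, this.2⟩

theorem pvGood_val (p : List Char × List Char) (h : pvGood p) :
    (p.2.head? = some 'A' ∨ p.2.head? = some 'S') ∧ ∀ a ∈ p.2, a ≠ 'H' := by
  unfold pvGood at h
  simp only [Bool.and_eq_true, Bool.or_eq_true, beq_iff_eq, List.all_eq_true] at h
  obtain ⟨⟨-, hv⟩, hH⟩ := h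
  refine ⟨hv, fun a ha => ?_⟩
  have := hH a ha
  simpa using this

-- pvRep passes over a block containing no 'H' when the key starts with 'H'.
theorem pvRep_pass (k v : List Char) (t : List Char) (hk : ∃ u, k = 'H' :: u)
    (ht : ∀ a ∈ t, a ≠ 'H') :
    ∀ X, pvRep k v (t ++ X) = t ++ pvRep k v X := by
  induction t with
  | nil => simp
  | cons a t' ih =>
    intro X
    obtain ⟨u, hku⟩ := hk
    have ha : a ≠ 'H' := ht a (by simp)
    have hnp : k.isPrefixOf (a :: (t' ++ X)) = false := by
      subst hku
      simp [List.isPrefixOf]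
      intro h
      exact absurd h.symm ha
    rw [List.cons_append, pvRep, if_neg (by simp [hnp]), ih (fun a ha => ht a (by simp [ha])) X]
    simp

-- pvSub passes over a block containing no 'H' when all keys start with 'H'.
theorem pvSub_pass (ps : List (List Char × List Char)) (hps : ∀ p ∈ ps, pvGood p)
    (t : List Char) (ht : ∀ a ∈ t, a ≠ 'H') :
    ∀ X, pvSub ps (t ++ X) = t ++ pvSub ps X := by
  induction t with
  | nil => simp
  | cons a t' ih =>
    intro X
    have ha : a ≠ 'H' := ht a (by simp)
    have hnone : pvFirstMatch ps (a :: (t' ++ X)) = none := by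
      rw [pvFirstMatch_eq_none_iff]
      intro p hp
      obtain ⟨u, hku, -⟩ := pvGood_key p (hps p hp)
      rw [hku]
      simp [List.isPrefixOf]
      intro h
      exact absurd h.symm ha
    rw [List.cons_append, pvSub, hnone, ih (fun a ha => ht a (by simp [ha])) X]
    simp

-- Occurrence reflection: an 'A'/'S'-free block that is a prefix of pvSub's output was
-- already a prefix of the input (every emitted value starts with 'A' or 'S').
theorem pvSub_prefix_reflect (ps : List (List Char × List Char)) (hps : ∀ p ∈ ps, pvGood p) :
    ∀ (cs u : List Char), (∀ a ∈ u, a ≠ 'A' ∧ a ≠ 'S') →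
      u.isPrefixOf (pvSub ps cs) = true → u.isPrefixOf cs = true := by
  intro cs
  induction cs using pvSub.induct ps with
  | case1 =>
    intro u hu h
    simpa [pvSub] using h
  | case2 c cs' k v hm ih =>
    intro u hu h
    rw [pvSub, hm] at h
    match u with
    | [] => simp
    | a :: u' =>
      exfalso
      obtain ⟨hmem, -⟩ := pvFirstMatch_some ps _ _ hm
      obtain ⟨hv, -⟩ := pvGood_val (k, v) (hps (k, v) hmem)
      obtain ⟨ha1, ha2⟩ := hu a (by simp)
      match v, hv with
      | [], hv => rcases hv with hv | hv <;> simp at hv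
      | b :: v', hv =>
        have hb : b = 'A' ∨ b = 'S' := by
          rcases hv with hv | hv <;> simp at hv <;> simp [hv]
        simp [List.isPrefixOf] at h
        rcases hb with rfl | rfl
        · exact ha1 (by simpa using h.1)
        · exact ha2 (by simpa using h.1)
  | case3 c cs' hm ih =>
    intro u hu h
    rw [pvSub, hm] at h
    match u with
    | [] => simp
    | a :: u' =>
      obtain ⟨rfl, h2⟩ := List.cons_prefix_cons.mp (List.isPrefixOf_iff_prefix.mp h)
      have := ih u' (fun a ha => hu a (by simp [ha])) (List.isPrefixOf_iff_prefix.mpr h2)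
      exact List.isPrefixOf_iff_prefix.mpr
        (List.cons_prefix_cons.mpr ⟨rfl, List.isPrefixOf_iff_prefix.mp this⟩)

-- Key step: appending one (key, value) pair to the alternation equals running one more
-- sequential pvRep pass over the previous alternation's output.
theorem pvStep (ps : List (List Char × List Char)) (k v : List Char)
    (hps : ∀ p ∈ ps, pvGood p) (hkv : pvGood (k, v)) :
    ∀ (n : Nat) (s : List Char), s.length ≤ n →
      pvRep k v (pvSub ps s) = pvSub (ps ++ [(k, v)]) s := by
  intro n
  induction n with
  | zero =>
    intro s hs
    have : s = [] := List.length_eq_zero_iff.mp (Nat.le_zero.mp hs)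
    subst this
    simp [pvSub, pvRep]
  | succ n ih =>
    intro s hs
    match s with
    | [] => simp [pvSub, pvRep]
    | c :: cs =>
      obtain ⟨tk, hktk0, htk⟩ := pvGood_key (k, v) hkv
      have hktk : k = 'H' :: tk := hktk0
      cases hm : pvFirstMatch ps (c :: cs) with
      | some p =>
        obtain ⟨kt, vt⟩ := p
        obtain ⟨hmem, -⟩ := pvFirstMatch_some ps _ _ hm
        obtain ⟨-, hvtH⟩ := pvGood_val (kt, vt) (hps (kt, vt) hmem)
        rw [pvSub, hm]
        rw [pvRep_pass k v vt ⟨tk, hktk⟩ hvtH]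
        rw [ih (cs.drop (kt.length - 1))
            (by
              have h1 : (cs.drop (kt.length - 1)).length ≤ cs.length := by
                simp [List.length_drop]
              have h2 : cs.length ≤ n := by simpa using Nat.succ_le_succ_iff.mp hs
              omega)]
        rw [pvSub, pvFirstMatch_append_some ps [(k, v)] _ _ hm]
      | none =>
        by_cases hk : k.isPrefixOf (c :: cs)
        · -- the new key matches at this position
          rw [hktk] at hk
          obtain ⟨hcH, htkcs⟩ := List.cons_prefix_cons.mp (List.isPrefixOf_iff_prefix.mp hk)
          subst hcH
          obtain ⟨r, rfl⟩ := htkcs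
          rw [pvSub, hm]
          rw [pvSub_pass ps hps tk (fun a ha => (htk a ha).1) r]
          have hlen : k.length - 1 = tk.length := by rw [hktk]; simp
          have hrep : pvRep k v ('H' :: (tk ++ pvSub ps r)) =
              v ++ pvRep k v (pvSub ps r) := by
            rw [pvRep, if_pos (by
              rw [hktk]
              simp [List.isPrefixOf_iff_prefix.mpr (List.prefix_append tk (pvSub ps r))])]
            rw [hlen, List.drop_left]
          rw [hrep, ih r (by
            have := hs
            simp [List.length_append] at this
            omega)]
          have hm' : pvFirstMatch (ps ++ [(k, v)]) ('H' :: (tk ++ r)) = some (k, v) := by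
            rw [pvFirstMatch_append_none ps _ _ hm]
            have hk' : k.isPrefixOf ('H' :: (tk ++ r)) = true := by rw [hktk]; exact hk
            simp [pvFirstMatch, hk']
          rw [pvSub, hm']
          dsimp only
          rw [hlen, List.drop_left]
        · -- no key at all matches at this position
          rw [pvSub, hm]
          have hnp : k.isPrefixOf (c :: pvSub ps cs) = false := by
            rw [Bool.eq_false_iff]
            intro hcon
            rw [hktk] at hcon
            obtain ⟨hcH, htkpre⟩ := List.cons_prefix_cons.mp (List.isPrefixOf_iff_prefix.mp hcon)
            have hrefl := pvSub_prefix_reflect ps hps cs tk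
              (fun a ha => ⟨(htk a ha).2.1, (htk a ha).2.2⟩)
              (List.isPrefixOf_iff_prefix.mpr htkpre)
            apply hk
            rw [hktk]
            exact List.isPrefixOf_iff_prefix.mpr
              (List.cons_prefix_cons.mpr ⟨hcH, List.isPrefixOf_iff_prefix.mp hrefl⟩)
          rw [pvRep, if_neg (by simp [hnp])]
          rw [ih cs (by simpa using Nat.succ_le_succ_iff.mp hs)]
          have hm' : pvFirstMatch (ps ++ [(k, v)]) (c :: cs) = none := by
            rw [pvFirstMatch_append_none ps _ _ hm]
            simp [pvFirstMatch, hk]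
          rw [pvSub, hm']

-- The empty alternation is the identity.
theorem pvSub_nil (s : List Char) : pvSub [] s = s := by
  induction s with
  | nil => simp [pvSub]
  | cons c cs ih =>
    rw [pvSub]
    simp [pvFirstMatch, ih]

-- The six sequential scans collapse into the single alternation scan.
theorem pvChain (l : List Char) :
    pvRep "Host 2 :".toList "Sam:".toList
      (pvRep "Host 1 :".toList "Alex:".toList
        (pvRep "Host2:".toList "Sam:".toList
          (pvRep "Host1:".toList "Alex:".toList
            (pvRep "Host 2:".toList "Sam:".toList
              (pvRep "Host 1:".toList "Alex:".toList l))))) = pvSub pvMapping l := by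
  have e1 : pvRep "Host 1:".toList "Alex:".toList l =
      pvSub [("Host 1:".toList, "Alex:".toList)] l := by
    have := pvStep [] "Host 1:".toList "Alex:".toList (by simp) (by unfold pvGood; decide) l.length l le_rfl
    rwa [pvSub_nil] at this
  rw [e1,
    pvStep [("Host 1:".toList, "Alex:".toList)] "Host 2:".toList "Sam:".toList
      (by intro p hp; fin_cases hp <;> (unfold pvGood; decide)) (by unfold pvGood; decide) l.length l le_rfl,
    pvStep _ "Host1:".toList "Alex:".toList (by intro p hp; fin_cases hp <;> (unfold pvGood; decide)) (by unfold pvGood; decide) l.length l le_rfl,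
    pvStep _ "Host2:".toList "Sam:".toList (by intro p hp; fin_cases hp <;> (unfold pvGood; decide)) (by unfold pvGood; decide) l.length l le_rfl,
    pvStep _ "Host 1 :".toList "Alex:".toList (by intro p hp; fin_cases hp <;> (unfold pvGood; decide)) (by unfold pvGood; decide) l.length l le_rfl,
    pvStep _ "Host 2 :".toList "Sam:".toList (by intro p hp; fin_cases hp <;> (unfold pvGood; decide)) (by unfold pvGood; decide) l.length l le_rfl]
  rfl

-- ===== VERDICT (by name: the statement is the Claim_ definition above) =====
theorem normalize_speaker_labels_spec : Claim_equal_normalize_speaker_labels := by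
  intro script _
  unfold Spec_normalize_speaker_labels normalize_speaker_labels normalize_speaker_labels_alt
  simp only [PySem.Str.replace, String.toList_ofList]
  rw [pvReplace_eq_pvRep _ _ _ (by decide), pvReplace_eq_pvRep _ _ _ (by decide),
    pvReplace_eq_pvRep _ _ _ (by decide), pvReplace_eq_pvRep _ _ _ (by decide),
    pvReplace_eq_pvRep _ _ _ (by decide), pvReplace_eq_pvRep _ _ _ (by decide)]
  rw [pvChain]
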